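-- pv_equiv track=rewrite | github.com/junesk9/Codes.from.Articles | 2023nomura2/z6_intron.logo.table.v3.py | NTcount
-- ===== SOURCE A (Python) =====
-- def NTcount(seq, dic):
--     for en,s in enumerate(seq):
--         if s != "N":
--             if not s in dic.keys():
--                 dic[s] = [0 for i in range(len(seq))]
--             else: pass
--             dic[s][en] += 1
--         else: pass
--
--     return dic
-- ===== SOURCE B (Python) =====
-- # B: two-pass, character-major — first materialize an index char -> positions, then update dic per character.
-- # Same return value as A; both mutate `dic` in place (A may interleave partial mutations differently only on
-- # inputs where an existing row is too short and an IndexError is raised — excluded by Pre_).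
-- def NTcount(seq, dic):
--     index = {}
--     for en, s in enumerate(seq):
--         if s != "N":
--             index.setdefault(s, []).append(en)
--     for s, positions in index.items():
--         if s not in dic:
--             dic[s] = [0] * len(seq)
--         for en in positions:
--             dic[s][en] += 1
--     return dic
-- ===== Notes on version B (the rewrite author's own statement) =====
-- stated objective: alternative
-- what changed: A increments counters position-major in a single scan that creates rows lazily; B first materializes an index mapping each non-N character to its list of positions, then updates dic character-major from that index.
import Mathlib
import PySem

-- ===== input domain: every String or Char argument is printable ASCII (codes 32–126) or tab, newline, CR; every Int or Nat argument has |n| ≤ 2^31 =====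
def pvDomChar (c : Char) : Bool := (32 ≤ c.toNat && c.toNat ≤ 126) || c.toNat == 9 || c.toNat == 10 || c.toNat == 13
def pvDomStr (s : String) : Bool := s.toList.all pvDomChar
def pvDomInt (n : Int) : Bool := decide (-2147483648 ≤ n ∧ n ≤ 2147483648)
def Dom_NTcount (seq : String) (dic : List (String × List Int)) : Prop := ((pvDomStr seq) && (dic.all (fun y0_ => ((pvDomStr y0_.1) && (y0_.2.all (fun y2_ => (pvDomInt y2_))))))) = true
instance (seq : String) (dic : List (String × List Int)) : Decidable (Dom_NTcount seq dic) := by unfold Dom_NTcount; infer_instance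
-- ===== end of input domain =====

-- B re-implements A with a two-pass, character-major strategy (an index char -> positions is built first);
-- return-value equivalence is proved (both Pythons also mutate `dic` in place, identically wherever A returns).

-- ===== PORT A =====
-- `dic[s][en] += 1` is ported with the total pyGetD/pySetD; they are exact exactly where Python does not
-- raise IndexError, which Pre_ guarantees.
def NTcount (seq : String) (dic : List (String × List Int)) : List (String × List Int) :=
  ((PySem.List.enumerate seq.toList 0).foldl
    (fun (d : PySem.Dict String (List Int)) p =>
      let s := String.singleton p.2
      if s ≠ "N" then
        let d := if ¬ ((PySem.Dict.keys d).contains s) then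
                   PySem.Dict.insert d s ((List.range seq.toList.length).map (fun _ => (0 : Int)))
                 else d
        PySem.Dict.modify d s [] (fun lst => PySem.List.pySetD lst p.1 (PySem.List.pyGetD lst p.1 0 + 1))
      else d)
    (PySem.Dict.mk dic)).items

-- ===== PORT B =====
def NTcount_alt (seq : String) (dic : List (String × List Int)) : List (String × List Int) :=
  let index : PySem.Dict String (List Int) :=
    (PySem.List.enumerate seq.toList 0).foldl
      (fun ix p =>
        let s := String.singleton p.2
        if s ≠ "N" then PySem.Dict.modify ix s [] (fun ps => ps ++ [p.1]) else ix)
      PySem.Dict.empty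
  (index.items.foldl
    (fun (d : PySem.Dict String (List Int)) q =>
      let d := if ¬ (PySem.Dict.contains d q.1) then
                 PySem.Dict.insert d q.1 (List.replicate seq.toList.length (0 : Int))
               else d
      q.2.foldl
        (fun d en => PySem.Dict.modify d q.1 [] (fun lst => PySem.List.pySetD lst en (PySem.List.pyGetD lst en 0 + 1)))
        d)
    (PySem.Dict.mk dic)).items

-- ===== PRECONDITION & SPEC =====
-- Pre_ excludes (a) inputs on which the Python A raises IndexError — a pre-existing row shorter than some
-- position at which its (non-'N') character occurs in seq; B raises there too — and (b) association lists
-- with duplicate keys, which do not represent any Python dict.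
def Pre_NTcount (seq : String) (dic : List (String × List Int)) : Prop :=
  (dic.map Prod.fst).Nodup ∧
  ∀ p ∈ dic, ∀ q ∈ PySem.List.enumerate seq.toList 0,
    (q.2 ≠ 'N' ∧ String.singleton q.2 = p.1) → q.1 < (p.2.length : Int)
instance (seq : String) (dic : List (String × List Int)) : Decidable (Pre_NTcount seq dic) := by
  unfold Pre_NTcount; infer_instance

def pvWitness_NTcount : String × (List (String × List Int)) := ("ACN", [("A", [0, 0, 0])])

def Spec_NTcount (seq : String) (dic : List (String × List Int)) (out : List (String × List Int)) : Prop := out = NTcount_alt seq dic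
instance (seq : String) (dic : List (String × List Int)) (out : List (String × List Int)) : Decidable (Spec_NTcount seq dic out) := by unfold Spec_NTcount; infer_instance

-- ===== CLAIM (what is proved, stated in full; the proofs are below) =====
def Claim_equal_NTcount : Prop := ∀ (seq : String) (dic : List (String × List Int)), Dom_NTcount seq dic → Pre_NTcount seq dic → Spec_NTcount seq dic (NTcount seq dic)

-- ===== LEMMAS AND PROOFS =====

-- proof-only abbreviations: the increment at one position, its iteration, the positions of a key,
-- and the two loop bodies
def pvInc (en : Int) (v : List Int) : List Int :=
  PySem.List.pySetD v en (PySem.List.pyGetD v en 0 + 1)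

def pvApply (v : List Int) (ps : List Int) : List Int := ps.foldl (fun v en => pvInc en v) v

def pvPos (k : String) (Q : List (String × Int)) : List Int :=
  (Q.filter (fun q => q.1 == k)).map (·.2)

def pvStepA (z : List Int) (d : PySem.Dict String (List Int)) (q : String × Int) : PySem.Dict String (List Int) :=
  PySem.Dict.modify (if ¬ ((PySem.Dict.keys d).contains q.1) then PySem.Dict.insert d q.1 z else d) q.1 []
    (fun lst => pvInc q.2 lst)

def pvStepB (z : List Int) (d : PySem.Dict String (List Int)) (q : String × List Int) : PySem.Dict String (List Int) :=
  q.2.foldl (fun d en => PySem.Dict.modify d q.1 [] (fun lst => pvInc en lst))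
    (if ¬ (PySem.Dict.contains d q.1) then PySem.Dict.insert d q.1 z else d)

theorem pv_singleton_eq_iff (c : Char) : (String.singleton c = "N") ↔ c = 'N' := by
  constructor
  · intro h; have := congrArg String.toList h; simpa using this
  · rintro rfl; rfl

-- guard bridge: a fold with the `s != "N"` guard is a fold over the filtered, mapped pair list
theorem pv_foldl_guard {α : Type} (l : List (Int × Char)) (f : α → String × Int → α) (a : α) :
    l.foldl (fun a p => if String.singleton p.2 ≠ "N" then f a (String.singleton p.2, p.1) else a) a
      = ((l.filter (fun p => p.2 != 'N')).map (fun p => (String.singleton p.2, p.1))).foldl f a := by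
  induction l generalizing a with
  | nil => rfl
  | cons p l ih =>
    rw [List.foldl_cons]
    by_cases h : p.2 = 'N'
    · rw [if_neg (by simp [pv_singleton_eq_iff, h])]
      rw [List.filter_cons, if_neg (by simp [h])]
      exact ih a
    · rw [if_pos (by simp [pv_singleton_eq_iff, h])]
      rw [List.filter_cons, if_pos (by simp [h])]
      simp only [List.map_cons, List.foldl_cons]
      exact ih _

theorem pv_keys_contains (d : PySem.Dict String (List Int)) (k : String) :
    (PySem.Dict.keys d).contains k = d.contains k := by
  rw [Bool.eq_iff_iff]
  simp [PySem.Dict.keys, PySem.Dict.contains, List.mem_map, beq_iff_eq]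

theorem pv_stepA_get_self (z : List Int) (d : PySem.Dict String (List Int)) (q : String × Int) :
    (pvStepA z d q).get? q.1 = some (pvInc q.2 (d.getD q.1 z)) := by
  unfold pvStepA
  rw [pv_keys_contains]
  by_cases hc : d.contains q.1
  · rw [if_neg (by simp [hc])]
    have hs : (d.get? q.1).isSome := by rw [← PySem.Dict.contains_eq_isSome_get?]; exact hc
    obtain ⟨v, hv⟩ := Option.isSome_iff_exists.mp hs
    rw [PySem.Dict.modify, PySem.Dict.get?_insert_self,
        PySem.Dict.getD_of_get?_eq_some d [] hv, PySem.Dict.getD_of_get?_eq_some d z hv]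
  · rw [if_pos (by simp [hc])]
    rw [PySem.Dict.modify, PySem.Dict.get?_insert_self, PySem.Dict.getD_insert_self,
        PySem.Dict.getD_of_not_contains d z (by simpa using hc)]

theorem pv_stepA_get_other (z : List Int) (d : PySem.Dict String (List Int)) (q : String × Int)
    (k : String) (h : k ≠ q.1) : (pvStepA z d q).get? k = d.get? k := by
  unfold pvStepA
  rw [PySem.Dict.modify, PySem.Dict.get?_insert_of_ne _ _ h]
  by_cases hc : (PySem.Dict.keys d).contains q.1
  · rw [if_neg (by simpa using hc)]
  · rw [if_pos (by simpa using hc), PySem.Dict.get?_insert_of_ne _ _ h]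

theorem pv_stepA_keys (z : List Int) (d : PySem.Dict String (List Int)) (q : String × Int) :
    (pvStepA z d q).keys = PySem.Set.add d.keys q.1 := by
  unfold pvStepA
  rw [pv_keys_contains, PySem.Dict.modify, PySem.Set.add]
  by_cases hc : d.contains q.1
  · rw [if_neg (by simp [hc]), PySem.Dict.keys_insert_of_contains d _ hc,
        if_pos (by rw [PySem.Set.contains_eq_listContains, pv_keys_contains]; exact hc)]
  · rw [if_pos (by simp [hc]), PySem.Dict.keys_insert_of_contains _ _ (by simp),
        PySem.Dict.keys_insert_of_not_contains d z (by simpa using hc),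
        if_neg (by rw [PySem.Set.contains_eq_listContains, pv_keys_contains]; simpa using hc)]

theorem pv_stepA_getD_self (z : List Int) (d : PySem.Dict String (List Int)) (q : String × Int) :
    (pvStepA z d q).getD q.1 z = pvInc q.2 (d.getD q.1 z) :=
  PySem.Dict.getD_of_get?_eq_some _ z (pv_stepA_get_self z d q)

theorem pv_pos_nil (k : String) (Q : List (String × Int)) (h : k ∉ Q.map Prod.fst) :
    pvPos k Q = [] := by
  unfold pvPos
  rw [List.filter_eq_nil_iff.mpr]
  · rfl
  · intro q hq hbeq
    exact h (List.mem_map.mpr ⟨q, hq, beq_iff_eq.mp hbeq⟩)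

-- characterization of A's fold
theorem pv_foldA_get (z : List Int) (Q : List (String × Int)) (d : PySem.Dict String (List Int)) (k : String) :
    (Q.foldl (pvStepA z) d).get? k
      = if k ∈ Q.map Prod.fst then some (pvApply (d.getD k z) (pvPos k Q)) else d.get? k := by
  induction Q generalizing d with
  | nil => simp
  | cons q Q ih =>
    obtain ⟨k0, en⟩ := q
    rw [List.foldl_cons, ih]
    by_cases hk : k = k0
    · subst hk
      have hcons : k ∈ ((k, en) :: Q).map Prod.fst := by
        rw [List.map_cons]; exact List.mem_cons_self ..
      by_cases hm : k ∈ Q.map Prod.fst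
      · rw [if_pos hm, if_pos hcons]
        rw [pv_stepA_getD_self]
        congr 1
        show pvApply (pvInc en (d.getD k z)) (pvPos k Q) = pvApply (d.getD k z) (pvPos k ((k, en) :: Q))
        unfold pvPos
        rw [List.filter_cons, if_pos (by simp)]
        rfl
      · rw [if_neg hm, if_pos hcons, pv_stepA_get_self]
        congr 1
        show pvInc en (d.getD k z) = pvApply (d.getD k z) (pvPos k ((k, en) :: Q))
        unfold pvPos
        rw [List.filter_cons, if_pos (by simp)]
        show pvInc en (d.getD k z) = pvApply (d.getD k z) (en :: pvPos k Q)
        rw [pv_pos_nil k Q hm]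
        rfl
    · have hmap : k ∈ ((k0, en) :: Q).map Prod.fst ↔ k ∈ Q.map Prod.fst := by
        simp [hk]
      have hpos : pvPos k ((k0, en) :: Q) = pvPos k Q := by
        unfold pvPos; rw [List.filter_cons, if_neg (by simp [beq_iff_eq]; exact Ne.symm hk)]
      have hgd : (pvStepA z d (k0, en)).getD k z = d.getD k z := by
        rw [PySem.Dict.getD_eq_get?_getD, pv_stepA_get_other z d (k0, en) k hk, ← PySem.Dict.getD_eq_get?_getD]
      by_cases hm : k ∈ Q.map Prod.fst
      · rw [if_pos hm, if_pos (hmap.mpr hm), hgd, hpos]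
      · rw [if_neg hm, if_neg (fun h => hm (hmap.mp h)), pv_stepA_get_other z d (k0, en) k hk]

theorem pv_foldA_keys (z : List Int) (Q : List (String × Int)) (d : PySem.Dict String (List Int)) :
    (Q.foldl (pvStepA z) d).keys = PySem.Set.update d.keys (Q.map Prod.fst) := by
  induction Q generalizing d with
  | nil => rfl
  | cons q Q ih =>
    rw [List.foldl_cons, ih, List.map_cons, PySem.Set.update_cons, pv_stepA_keys]

-- B's inner loop
theorem pv_inner_get_self (k : String) (ps : List Int) (d : PySem.Dict String (List Int)) (v : List Int)
    (h : d.get? k = some v) :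
    (ps.foldl (fun d en => PySem.Dict.modify d k [] (fun lst => pvInc en lst)) d).get? k
      = some (pvApply v ps) := by
  induction ps generalizing d v with
  | nil => simpa [pvApply] using h
  | cons en ps ih =>
    rw [List.foldl_cons]
    have h1 : (PySem.Dict.modify d k [] (fun lst => pvInc en lst)).get? k = some (pvInc en v) := by
      rw [PySem.Dict.modify, PySem.Dict.get?_insert_self, PySem.Dict.getD_of_get?_eq_some d [] h]
    rw [ih _ _ h1]
    rfl

theorem pv_inner_get_other (k k' : String) (hne : k' ≠ k) (ps : List Int) (d : PySem.Dict String (List Int)) :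
    (ps.foldl (fun d en => PySem.Dict.modify d k [] (fun lst => pvInc en lst)) d).get? k' = d.get? k' := by
  induction ps generalizing d with
  | nil => rfl
  | cons en ps ih =>
    rw [List.foldl_cons, ih, PySem.Dict.modify, PySem.Dict.get?_insert_of_ne _ _ hne]

theorem pv_inner_keys (k : String) (ps : List Int) (d : PySem.Dict String (List Int))
    (h : d.contains k = true) :
    (ps.foldl (fun d en => PySem.Dict.modify d k [] (fun lst => pvInc en lst)) d).keys = d.keys := by
  induction ps generalizing d with
  | nil => rfl
  | cons en ps ih =>
    rw [List.foldl_cons, ih _ (by rw [PySem.Dict.contains_modify]; simp),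
        PySem.Dict.keys_modify, PySem.Dict.keys_insert_of_contains _ _ h]

theorem pv_stepB_get_self (z : List Int) (d : PySem.Dict String (List Int)) (q : String × List Int) :
    (pvStepB z d q).get? q.1 = some (pvApply (d.getD q.1 z) q.2) := by
  unfold pvStepB
  by_cases hc : d.contains q.1
  · rw [if_neg (by simp [hc])]
    have hs : (d.get? q.1).isSome := by rw [← PySem.Dict.contains_eq_isSome_get?]; exact hc
    obtain ⟨v, hv⟩ := Option.isSome_iff_exists.mp hs
    rw [pv_inner_get_self _ _ _ v hv, PySem.Dict.getD_of_get?_eq_some d z hv]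
  · rw [if_pos (by simp [hc])]
    rw [pv_inner_get_self _ _ _ z (PySem.Dict.get?_insert_self d q.1 z),
        PySem.Dict.getD_of_not_contains d z (by simpa using hc)]

theorem pv_stepB_get_other (z : List Int) (d : PySem.Dict String (List Int)) (q : String × List Int)
    (k : String) (h : k ≠ q.1) : (pvStepB z d q).get? k = d.get? k := by
  unfold pvStepB
  rw [pv_inner_get_other _ _ h]
  by_cases hc : d.contains q.1
  · rw [if_neg (by simp [hc])]
  · rw [if_pos (by simp [hc]), PySem.Dict.get?_insert_of_ne _ _ h]

theorem pv_stepB_keys (z : List Int) (d : PySem.Dict String (List Int)) (q : String × List Int) :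
    (pvStepB z d q).keys = PySem.Set.add d.keys q.1 := by
  unfold pvStepB
  by_cases hc : d.contains q.1
  · rw [if_neg (by simp [hc]), pv_inner_keys _ _ _ hc, PySem.Set.add_of_mem]
    exact (PySem.Dict.contains_iff_mem_keys d q.1).mp hc
  · rw [if_pos (by simp [hc]), pv_inner_keys _ _ _ (PySem.Dict.contains_insert_self d q.1 z),
        PySem.Dict.keys_insert_of_not_contains d z (by simpa using hc), PySem.Set.add]
    rw [if_neg (by
      rw [PySem.Set.contains_eq_listContains]
      intro hmem
      have hmem' : q.1 ∈ d.keys := by simpa using hmem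
      have := (PySem.Dict.contains_iff_mem_keys d q.1).mpr hmem'
      simp [this] at hc)]

-- characterization of B's group fold, for groups of the shape S.map (k ↦ (k, pos k)) with S nodup
theorem pv_foldB_get (z : List Int) (S : List String) (pos : String → List Int)
    (d : PySem.Dict String (List Int)) (k : String) (hS : S.Nodup) :
    ((S.map (fun k => (k, pos k))).foldl (pvStepB z) d).get? k
      = if k ∈ S then some (pvApply (d.getD k z) (pos k)) else d.get? k := by
  induction S generalizing d with
  | nil => simp
  | cons k0 S ih =>
    rw [List.map_cons, List.foldl_cons]
    have hS' : S.Nodup := (List.nodup_cons.mp hS).2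
    by_cases hk : k = k0
    · subst hk
      have hnot : k ∉ S := (List.nodup_cons.mp hS).1
      rw [ih _ hS', if_neg hnot, if_pos (List.mem_cons_self ..), pv_stepB_get_self]
    · rw [ih _ hS']
      have hgd : (pvStepB z d (k0, pos k0)).getD k z = d.getD k z := by
        rw [PySem.Dict.getD_eq_get?_getD, pv_stepB_get_other z d (k0, pos k0) k hk, ← PySem.Dict.getD_eq_get?_getD]
      by_cases hm : k ∈ S
      · rw [if_pos hm, if_pos (List.mem_cons_of_mem _ hm), hgd]
      · rw [if_neg hm, if_neg (by simp [hk, hm]), pv_stepB_get_other z d (k0, pos k0) k hk]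

theorem pv_foldB_keys (z : List Int) (G : List (String × List Int)) (d : PySem.Dict String (List Int)) :
    (G.foldl (pvStepB z) d).keys = PySem.Set.update d.keys (G.map Prod.fst) := by
  induction G generalizing d with
  | nil => rfl
  | cons q G ih =>
    rw [List.foldl_cons, ih, List.map_cons, PySem.Set.update_cons, pv_stepB_keys]

-- a nodup-keyed dict is its keys decorated with getD
theorem pv_items_eq_keys_map {ν : Type} (l : List (String × ν)) (dflt : ν) (h : (l.map Prod.fst).Nodup) :
    l = (PySem.Dict.mk l).keys.map (fun k => (k, (PySem.Dict.mk l).getD k dflt)) := by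
  induction l with
  | nil => rfl
  | cons p l ih =>
    obtain ⟨k, v⟩ := p
    have h' : (l.map Prod.fst).Nodup := (List.nodup_cons.mp (by simpa using h)).2
    have hk : k ∉ l.map Prod.fst := (List.nodup_cons.mp (by simpa using h)).1
    have hkeys : (PySem.Dict.mk ((k, v) :: l)).keys = k :: (PySem.Dict.mk l).keys := by
      simp [PySem.Dict.keys]
    rw [hkeys, List.map_cons]
    congr 1
    · congr 1
      rw [PySem.Dict.getD_eq_get?_getD, PySem.Dict.get?_mk_cons]
      simp
    · refine (ih h').trans (List.map_congr_left ?_)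
      intro x hx
      have hxk : x ≠ k := by
        intro he; subst he
        exact hk (by simpa [PySem.Dict.keys] using hx)
      congr 1
      rw [PySem.Dict.getD_eq_get?_getD, PySem.Dict.getD_eq_get?_getD, PySem.Dict.get?_mk_cons,
          if_neg (by simpa using (Ne.symm hxk))]

theorem pv_dict_ext (d₁ d₂ : PySem.Dict String (List Int)) (hk : d₁.keys = d₂.keys)
    (hn : d₁.keys.Nodup) (hg : ∀ k, d₁.get? k = d₂.get? k) : d₁.items = d₂.items := by
  obtain ⟨l₁⟩ := d₁
  obtain ⟨l₂⟩ := d₂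
  have e₁ := pv_items_eq_keys_map l₁ ([] : List Int) (by simpa [PySem.Dict.keys] using hn)
  have e₂ := pv_items_eq_keys_map l₂ ([] : List Int) (by
    have : (PySem.Dict.mk l₂).keys.Nodup := hk ▸ hn
    simpa [PySem.Dict.keys] using this)
  show l₁ = l₂
  rw [e₁, e₂, hk]
  apply List.map_congr_left
  intro x _
  rw [PySem.Dict.getD_eq_get?_getD, PySem.Dict.getD_eq_get?_getD, hg x]

theorem pv_update_ofList (s : List String) (xs : List String) :
    PySem.Set.update s (PySem.Set.ofList xs) = PySem.Set.update s xs := by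
  rw [PySem.Set.update_eq_append_filter, PySem.Set.update_eq_append_filter, PySem.Set.ofList_ofList]

-- ===== VERDICT (by name: the statement is the Claim_ definition above) =====
theorem NTcount_spec : Claim_equal_NTcount := by
  intro seq dic _ hpre
  unfold Spec_NTcount
  -- names for the pieces
  set n := seq.toList.length with hn
  have hz : (List.range n).map (fun _ => (0 : Int)) = List.replicate n 0 := by
    simp [List.map_const']
  -- the filtered, mapped pair list both passes traverse
  set Q : List (String × Int) :=
    (((PySem.List.enumerate seq.toList 0).filter (fun p => p.2 != 'N')).map
      (fun p => (String.singleton p.2, p.1))) with hQ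
  set z : List Int := List.replicate n (0 : Int) with hzdef
  set d0 : PySem.Dict String (List Int) := PySem.Dict.mk dic with hd0
  -- A is the pair-major fold of pvStepA over Q
  have hA : NTcount seq dic = (Q.foldl (pvStepA z) d0).items := by
    show (((PySem.List.enumerate seq.toList 0).foldl
      (fun (d : PySem.Dict String (List Int)) p =>
        if String.singleton p.2 ≠ "N" then pvStepA ((List.range n).map (fun _ => (0 : Int))) d (String.singleton p.2, p.1) else d) d0)).items
      = (Q.foldl (pvStepA z) d0).items
    rw [pv_foldl_guard (PySem.List.enumerate seq.toList 0)
      (pvStepA ((List.range n).map (fun _ => (0 : Int)))) d0, hz]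
  -- B is the group fold of pvStepB over the materialized index's items
  set index : PySem.Dict String (List Int) :=
    Q.foldl (fun ix q => PySem.Dict.modify ix q.1 [] (fun ps => ps ++ [q.2])) PySem.Dict.empty with hidx
  have hB : NTcount_alt seq dic = (index.items.foldl (pvStepB z) d0).items := by
    show ((((PySem.List.enumerate seq.toList 0).foldl
      (fun (ix : PySem.Dict String (List Int)) p =>
        if String.singleton p.2 ≠ "N" then PySem.Dict.modify ix (String.singleton p.2, p.1).1 [] (fun ps => ps ++ [(String.singleton p.2, p.1).2]) else ix)
      PySem.Dict.empty).items.foldl (pvStepB z) d0)).items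
      = (index.items.foldl (pvStepB z) d0).items
    rw [pv_foldl_guard (PySem.List.enumerate seq.toList 0)
      (fun ix q => PySem.Dict.modify ix q.1 [] (fun ps => ps ++ [q.2])) PySem.Dict.empty]
  -- the index, characterized
  have hikeys : index.keys = PySem.Set.ofList (Q.map Prod.fst) := by
    rw [hidx, PySem.Dict.keys_foldl_modify_key Q Prod.fst [] (fun _ q x => x ++ [q.2]) PySem.Dict.empty]
    exact PySem.Set.update_nil_left _
  have higet : ∀ k, index.getD k [] = pvPos k Q := by
    intro k
    rw [hidx, PySem.Dict.getD_foldl_modify_append Q PySem.Dict.empty k]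
    rfl
  have hitems : index.items = (PySem.Set.ofList (Q.map Prod.fst)).map (fun k => (k, pvPos k Q)) := by
    have hnd : (index.items.map Prod.fst).Nodup := by
      show index.keys.Nodup
      rw [hikeys]; exact PySem.Set.nodup_ofList _
    have := pv_items_eq_keys_map index.items ([] : List Int) hnd
    rw [this]
    show index.keys.map _ = _
    rw [hikeys]
    exact List.map_congr_left (fun k _ => by rw [← higet k])
  -- keys of the two results agree
  have hd0keys : d0.keys = dic.map Prod.fst := rfl
  have hkeysEq : (Q.foldl (pvStepA z) d0).keys = (index.items.foldl (pvStepB z) d0).keys := by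
    rw [pv_foldA_keys, pv_foldB_keys, hitems]
    have h2 : List.map Prod.fst ((PySem.Set.ofList (Q.map Prod.fst)).map (fun k => (k, pvPos k Q)))
        = PySem.Set.ofList (Q.map Prod.fst) := by
      rw [List.map_map]
      exact List.map_id _
    rw [h2, pv_update_ofList]
  have hndA : (Q.foldl (pvStepA z) d0).keys.Nodup := by
    rw [pv_foldA_keys]
    exact PySem.Set.nodup_update _ _ (by rw [hd0keys]; exact hpre.1)
  -- get? of the two results agree
  have hgetEq : ∀ k, (Q.foldl (pvStepA z) d0).get? k = (index.items.foldl (pvStepB z) d0).get? k := by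
    intro k
    rw [pv_foldA_get, hitems, pv_foldB_get z (PySem.Set.ofList (Q.map Prod.fst)) (fun k => pvPos k Q) d0 k
      (PySem.Set.nodup_ofList _)]
    by_cases hm : k ∈ Q.map Prod.fst
    · rw [if_pos hm, if_pos ((PySem.Set.mem_ofList _ _).mpr hm)]
    · rw [if_neg hm, if_neg (fun h => hm ((PySem.Set.mem_ofList _ _).mp h))]
  rw [hA, hB]
  exact pv_dict_ext _ _ hkeysEq hndA hgetEq
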